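-- pv_equiv track=rewrite | github.com/JamesEnglish1028/opds-tools | opds_tools/util/helpers.py | parse_alt_identifier
-- ===== SOURCE A (Python) =====
-- def parse_alt_identifier(alt_id):
--     # Handle dict-based identifier first
--     if isinstance(alt_id, dict):
--         value = alt_id.get("value", "")
--         id_type = alt_id.get("type", "unknown")
--         return parse_alt_identifier(value)  # Recurse with just the value string
--
--     # Now assume alt_id is a string
--     if not isinstance(alt_id, str):
--         return {
--             "value": str(alt_id),
--             "type": "Unknown",
--             "url": None
--         }
--
--     alt_id = alt_id.lower().strip()
--
--     if alt_id.startswith("urn:isbn:"):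
--         isbn = alt_id.replace("urn:isbn:", "")
--         return {
--             "value": alt_id,
--             "type": "ISBN",
--             "isbn_13": isbn if len(isbn) == 13 else "",
--             "isbn_10": isbn if len(isbn) == 10 else "",
--             "url": f"https://isbnsearch.org/isbn/{isbn}"
--         }
--     elif alt_id.startswith("doi:") or alt_id.startswith("urn:doi:"):
--         doi = alt_id.replace("urn:doi:", "").replace("doi:", "")
--         return {
--             "value": alt_id,
--             "type": "DOI",
--             "url": f"https://doi.org/{doi}"
--         }
--     elif alt_id.startswith("hdl:") or alt_id.startswith("urn:hdl:"):
--         handle = alt_id.replace("urn:hdl:", "").replace("hdl:", "")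
--         return {
--             "value": alt_id,
--             "type": "Handle",
--             "url": f"https://hdl.handle.net/{handle}"
--         }
--     elif alt_id.startswith("issn:") or alt_id.startswith("urn:issn:"):
--         issn = alt_id.replace("urn:issn:", "").replace("issn:", "")
--         return {
--             "value": alt_id,
--             "type": "ISSN",
--             "url": f"https://portal.issn.org/resource/ISSN/{issn}"
--         }
--     elif alt_id.startswith("ark:") or alt_id.startswith("urn:ark:"):
--         ark = alt_id.replace("urn:ark:", "").replace("ark:", "")
--         return {
--             "value": alt_id,
--             "type": "ARK",
--             "url": f"https://n2t.net/ark:/{ark}"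
--         }
--     elif alt_id.startswith("ocn:") or alt_id.startswith("urn:ocn:"):
--         ocn = alt_id.replace("urn:ocn:", "").replace("ocn:", "")
--         return {
--             "value": alt_id,
--             "type": "OCLC",
--             "url": f"https://www.worldcat.org/oclc/{ocn}"
--         }
--     elif alt_id.startswith("urn:proquest.com/document-id/"):
--         doc_id = alt_id.replace("urn:proquest.com/document-id/", "")
--         return {
--             "value": alt_id,
--             "type": "ProQuest",
--             "url": f"https://www.proquest.com/docview/{doc_id}"
--         }
--     else:
--         return {
--             "value": alt_id,
--             "type": "Unknown",
--             "url": None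
--         }
-- ===== SOURCE B (Python) =====
-- SCHEMES = {
--     "doi": ("DOI", "https://doi.org/"),
--     "hdl": ("Handle", "https://hdl.handle.net/"),
--     "issn": ("ISSN", "https://portal.issn.org/resource/ISSN/"),
--     "ark": ("ARK", "https://n2t.net/ark:/"),
--     "ocn": ("OCLC", "https://www.worldcat.org/oclc/"),
-- }
--
--
-- def _without(s, sub):
--     # drop every occurrence of sub (split on it and glue the pieces back)
--     return "".join(s.split(sub))
--
--
-- def parse_alt_identifier(alt_id):
--     if isinstance(alt_id, dict):
--         return parse_alt_identifier(alt_id.get("value", ""))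
--     if not isinstance(alt_id, str):
--         return {"value": str(alt_id), "type": "Unknown", "url": None}
--
--     s = alt_id.lower().strip()
--     tokens = s.split(":")
--
--     if len(tokens) >= 3 and tokens[0] == "urn" and tokens[1] == "isbn":
--         isbn = _without(s, "urn:isbn:")
--         return {
--             "value": s,
--             "type": "ISBN",
--             "isbn_13": isbn if len(isbn) == 13 else "",
--             "isbn_10": isbn if len(isbn) == 10 else "",
--             "url": "https://isbnsearch.org/isbn/" + isbn,
--         }
--
--     if len(tokens) >= 2 and tokens[0] in SCHEMES:
--         scheme = tokens[0]
--     elif len(tokens) >= 3 and tokens[0] == "urn" and tokens[1] in SCHEMES: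
--         scheme = tokens[1]
--     else:
--         scheme = None
--
--     if scheme is not None:
--         label, base = SCHEMES[scheme]
--         rest = _without(_without(s, "urn:" + scheme + ":"), scheme + ":")
--         return {"value": s, "type": label, "url": base + rest}
--
--     if s.startswith("urn:proquest.com/document-id/"):
--         return {
--             "value": s,
--             "type": "ProQuest",
--             "url": "https://www.proquest.com/docview/"
--             + _without(s, "urn:proquest.com/document-id/"),
--         }
--
--     return {"value": s, "type": "Unknown", "url": None}
-- ===== Notes on version B (the rewrite author's own statement) =====
-- stated objective: alternative
-- what changed: Instead of an ordered startswith/replace chain, B tokenizes the string once by splitting on the colon separator, dispatches on the first one or two tokens through a scheme dictionary, and removes prefix occurrences by splitting on the substring and joining the pieces.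
import Mathlib
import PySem

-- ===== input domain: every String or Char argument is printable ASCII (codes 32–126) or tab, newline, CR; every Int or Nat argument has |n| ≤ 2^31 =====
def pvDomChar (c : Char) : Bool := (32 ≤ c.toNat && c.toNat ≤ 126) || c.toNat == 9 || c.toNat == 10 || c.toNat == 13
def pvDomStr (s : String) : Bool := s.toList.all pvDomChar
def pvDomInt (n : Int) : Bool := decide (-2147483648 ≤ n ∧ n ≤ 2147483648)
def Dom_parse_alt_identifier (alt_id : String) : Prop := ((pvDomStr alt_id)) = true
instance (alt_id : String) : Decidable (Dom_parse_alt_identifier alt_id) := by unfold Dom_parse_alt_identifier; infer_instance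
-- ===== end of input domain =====

-- B replaces A's ordered startswith/replace chain by tokenizing on ':' with a scheme-dictionary dispatch
-- and split-and-join substring removal; objective: alternative, same cost.
-- Both ports take a String, so A's dict-recursion and non-string branches are unreachable and not ported.

-- ===== PORT A =====
def parse_alt_identifier (alt_id : String) : List (String × Option String) :=
  let s := PySem.Str.strip (PySem.Str.lower alt_id)
  if PySem.Str.startswith s "urn:isbn:" then
    let isbn := PySem.Str.replace s "urn:isbn:" ""
    [("value", some s), ("type", some "ISBN"),
     ("isbn_13", some (if PySem.Str.len isbn = 13 then isbn else "")),
     ("isbn_10", some (if PySem.Str.len isbn = 10 then isbn else "")),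
     ("url", some ("https://isbnsearch.org/isbn/" ++ isbn))]
  else if PySem.Str.startswith s "doi:" || PySem.Str.startswith s "urn:doi:" then
    let doi := PySem.Str.replace (PySem.Str.replace s "urn:doi:" "") "doi:" ""
    [("value", some s), ("type", some "DOI"), ("url", some ("https://doi.org/" ++ doi))]
  else if PySem.Str.startswith s "hdl:" || PySem.Str.startswith s "urn:hdl:" then
    let handle := PySem.Str.replace (PySem.Str.replace s "urn:hdl:" "") "hdl:" ""
    [("value", some s), ("type", some "Handle"), ("url", some ("https://hdl.handle.net/" ++ handle))]
  else if PySem.Str.startswith s "issn:" || PySem.Str.startswith s "urn:issn:" then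
    let issn := PySem.Str.replace (PySem.Str.replace s "urn:issn:" "") "issn:" ""
    [("value", some s), ("type", some "ISSN"), ("url", some ("https://portal.issn.org/resource/ISSN/" ++ issn))]
  else if PySem.Str.startswith s "ark:" || PySem.Str.startswith s "urn:ark:" then
    let ark := PySem.Str.replace (PySem.Str.replace s "urn:ark:" "") "ark:" ""
    [("value", some s), ("type", some "ARK"), ("url", some ("https://n2t.net/ark:/" ++ ark))]
  else if PySem.Str.startswith s "ocn:" || PySem.Str.startswith s "urn:ocn:" then
    let ocn := PySem.Str.replace (PySem.Str.replace s "urn:ocn:" "") "ocn:" ""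
    [("value", some s), ("type", some "OCLC"), ("url", some ("https://www.worldcat.org/oclc/" ++ ocn))]
  else if PySem.Str.startswith s "urn:proquest.com/document-id/" then
    let doc_id := PySem.Str.replace s "urn:proquest.com/document-id/" ""
    [("value", some s), ("type", some "ProQuest"), ("url", some ("https://www.proquest.com/docview/" ++ doc_id))]
  else
    [("value", some s), ("type", some "Unknown"), ("url", none)]

-- ===== PORT B =====
-- the SCHEMES dict of Source B: scheme token ↦ (type label, URL prefix)
def pvSchemes : PySem.Dict String (String × String) :=
  PySem.Dict.mk
    [("doi", ("DOI", "https://doi.org/")),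
     ("hdl", ("Handle", "https://hdl.handle.net/")),
     ("issn", ("ISSN", "https://portal.issn.org/resource/ISSN/")),
     ("ark", ("ARK", "https://n2t.net/ark:/")),
     ("ocn", ("OCLC", "https://www.worldcat.org/oclc/"))]

-- Source B's _without: drop every occurrence of sub via split-and-join
def pvWithout (s sub : String) : String :=
  PySem.Str.join "" ((PySem.Str.split? s sub).getD [])

def parse_alt_identifier_alt (alt_id : String) : List (String × Option String) :=
  let s := PySem.Str.strip (PySem.Str.lower alt_id)
  let tokens := (PySem.Str.split? s ":").getD []
  if 3 ≤ tokens.length ∧ tokens.getD 0 "" = "urn" ∧ tokens.getD 1 "" = "isbn" then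
    let isbn := pvWithout s "urn:isbn:"
    [("value", some s), ("type", some "ISBN"),
     ("isbn_13", some (if PySem.Str.len isbn = 13 then isbn else "")),
     ("isbn_10", some (if PySem.Str.len isbn = 10 then isbn else "")),
     ("url", some ("https://isbnsearch.org/isbn/" ++ isbn))]
  else
    let scheme : Option String :=
      if 2 ≤ tokens.length ∧ (pvSchemes.get? (tokens.getD 0 "")).isSome then some (tokens.getD 0 "")
      else if 3 ≤ tokens.length ∧ tokens.getD 0 "" = "urn" ∧ (pvSchemes.get? (tokens.getD 1 "")).isSome then some (tokens.getD 1 "")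
      else none
    match scheme with
    | some sch =>
      let lb := pvSchemes.getD sch ("", "")
      let rest := pvWithout (pvWithout s ("urn:" ++ sch ++ ":")) (sch ++ ":")
      [("value", some s), ("type", some lb.1), ("url", some (lb.2 ++ rest))]
    | none =>
      if PySem.Str.startswith s "urn:proquest.com/document-id/" then
        [("value", some s), ("type", some "ProQuest"),
         ("url", some ("https://www.proquest.com/docview/" ++ pvWithout s "urn:proquest.com/document-id/"))]
      else
        [("value", some s), ("type", some "Unknown"), ("url", none)]

-- ===== PRECONDITION & SPEC =====
def Spec_parse_alt_identifier (alt_id : String) (out : List (String × Option String)) : Prop := out = parse_alt_identifier_alt alt_id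
instance (alt_id : String) (out : List (String × Option String)) : Decidable (Spec_parse_alt_identifier alt_id out) := by unfold Spec_parse_alt_identifier; infer_instance

-- ===== CLAIM (what is proved, stated in full; the proofs are below) =====
def Claim_equal_parse_alt_identifier : Prop := ∀ (alt_id : String), Dom_parse_alt_identifier alt_id → Spec_parse_alt_identifier alt_id (parse_alt_identifier alt_id)

-- ===== LEMMAS AND PROOFS =====


def pvSplit (sep : List Char) : List Char → List (List Char)
  | [] => [[]]
  | c :: t =>
    if sep.isPrefixOf (c :: t) ∧ sep ≠ [] then
      [] :: pvSplit sep ((c :: t).drop sep.length)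
    else
      List.modifyHead (c :: ·) (pvSplit sep t)
termination_by l => l.length
decreasing_by
  · simp only [List.length_drop, List.length_cons]
    rename_i h; rcases h with ⟨hp, hne⟩
    have : 0 < sep.length := List.length_pos_iff.mpr hne
    omega
  · simp

theorem pvSplit_ne_nil (sep l : List Char) : pvSplit sep l ≠ [] := by
  fun_induction pvSplit sep l with
  | case1 => simp
  | case2 => simp
  | case3 c t h ih =>
    cases h2 : pvSplit sep t with
    | nil => exact absurd h2 ih
    | cons a b => simp [pvSplit, h, h2]

theorem modifyHead_nil_append (xs : List (List Char)) :
    List.modifyHead (fun x => [] ++ x) xs = xs := by cases xs <;> simp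

theorem splitOn_go_eq (sep : List Char) (hs : sep ≠ []) :
    ∀ (fuel : Nat) (l cur : List Char) (acc : List (List Char)), l.length < fuel →
      PySem.Chars.splitOn.go sep fuel l cur acc
        = acc.reverse ++ List.modifyHead (cur.reverse ++ ·) (pvSplit sep l) := by
  intro fuel
  induction fuel with
  | zero => intro l cur acc h; omega
  | succ n ih =>
    intro l cur acc h
    cases l with
    | nil =>
      rw [PySem.Chars.splitOn.go]
      simp [pvSplit]
      omega
    | cons c t =>
      rw [PySem.Chars.splitOn.go]
      by_cases hp : sep.isPrefixOf (c :: t)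
      · have hlen : 0 < sep.length := List.length_pos_iff.mpr hs
        have hdrop : ((c :: t).drop sep.length).length < n := by
          have := (List.isPrefixOf_iff_prefix.mp hp).length_le
          simp only [List.length_drop]
          simp only [List.length_cons] at h ⊢
          simp only [List.length_cons] at this
          omega
        simp only [hp, if_pos]
        rw [ih _ _ _ hdrop]
        rw [pvSplit]
        simp only [hp, hs, if_pos, and_true, ne_eq, not_false_iff]
        cases h2 : pvSplit sep ((c :: t).drop sep.length) with
        | nil => exact absurd h2 (pvSplit_ne_nil _ _)
        | cons a b => simp
      · have ht : t.length < n := by simp at h; omega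
        simp only [hp, if_neg, Bool.false_eq_true, not_false_iff]
        rw [ih _ _ _ ht]
        rw [pvSplit]
        simp only [hp, false_and, if_neg, not_false_iff]
        cases h2 : pvSplit sep t with
        | nil => exact absurd h2 (pvSplit_ne_nil _ _)
        | cons a b => simp

theorem splitOn_eq (sep l : List Char) (hs : sep ≠ []) :
    PySem.Chars.splitOn l sep = pvSplit sep l := by
  rw [PySem.Chars.splitOn, splitOn_go_eq sep hs _ _ _ _ (by omega)]
  simpa using modifyHead_nil_append (pvSplit sep l)

theorem replace_go_eq (sep : List Char) (hs : sep ≠ []) :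
    ∀ (fuel : Nat) (l acc : List Char), l.length ≤ fuel →
      PySem.Chars.replace.go sep [] fuel l acc
        = acc.reverse ++ (pvSplit sep l).flatten := by
  intro fuel
  induction fuel with
  | zero =>
    intro l acc h
    have : l = [] := by cases l <;> simp_all
    subst this
    rw [PySem.Chars.replace.go]
    simp [pvSplit]
  | succ n ih =>
    intro l acc h
    cases l with
    | nil =>
      rw [PySem.Chars.replace.go]
      simp [pvSplit]
      omega
    | cons c t =>
      rw [PySem.Chars.replace.go]
      by_cases hp : sep.isPrefixOf (c :: t)
      · have hlen : 0 < sep.length := List.length_pos_iff.mpr hs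
        have hdrop : ((c :: t).drop sep.length).length ≤ n := by
          have h1 := (List.isPrefixOf_iff_prefix.mp hp).length_le
          simp only [List.length_drop, List.length_cons] at h1 h ⊢
          omega
        simp only [hp, if_pos]
        rw [ih _ _ hdrop]
        rw [pvSplit]
        simp [hp, hs]
      · have ht : t.length ≤ n := by simp at h; omega
        simp only [hp, if_neg, Bool.false_eq_true, not_false_iff]
        rw [ih _ _ ht]
        rw [pvSplit]
        simp only [hp, false_and, if_neg, not_false_iff]
        cases h2 : pvSplit sep t with
        | nil => exact absurd h2 (pvSplit_ne_nil _ _)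
        | cons a b => simp

theorem replace_eq_flatten (sep l : List Char) (hs : sep ≠ []) :
    PySem.Chars.replace l sep [] = (pvSplit sep l).flatten := by
  rw [PySem.Chars.replace]
  simp only [List.isEmpty_iff, hs, if_neg, not_false_iff]
  simpa using replace_go_eq sep hs l.length l [] le_rfl

theorem intercalate_cons_ne (sep x : List Char) (xs : List (List Char)) (h : xs ≠ []) :
    List.intercalate sep (x :: xs) = x ++ sep ++ List.intercalate sep xs := by
  cases xs with
  | nil => exact absurd rfl h
  | cons b r => simp [List.intercalate, List.intersperse]

theorem join_nil_eq_flatten (parts : List (List Char)) :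
    PySem.Chars.join [] parts = parts.flatten := by
  induction parts with
  | nil => simp [PySem.Chars.join, List.intercalate]
  | cons a t ih =>
    cases t with
    | nil => simp [PySem.Chars.join, List.intercalate, List.intersperse]
    | cons b r =>
      simp only [PySem.Chars.join, List.intercalate, List.intersperse] at *
      simp [ih]

theorem pvWithout_eq_replace (s sub : String) (hs : sub ≠ "") :
    pvWithout s sub = PySem.Str.replace s sub "" := by
  have hl : sub.toList ≠ [] := by
    intro h; apply hs
    have := congrArg String.ofList h
    simpa using this
  rw [pvWithout, PySem.Str.replace, PySem.Str.split?, PySem.Chars.split?]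
  simp only [List.isEmpty_iff, hl, if_neg, not_false_iff]
  rw [PySem.Str.join]
  have h0 : ("" : String).toList = ([] : List Char) := rfl
  rw [splitOn_eq _ _ hl]
  simp only [Option.map_some, Option.getD_some, List.map_map, h0]
  rw [replace_eq_flatten _ _ hl]
  congr 1
  have hmap : List.map (String.toList ∘ String.ofList) (pvSplit sub.toList s.toList)
      = pvSplit sub.toList s.toList := by
    simp only [Function.comp_def, String.toList_ofList, List.map_id']
  rw [hmap, join_nil_eq_flatten]

theorem pvSplit_append_cons (c : Char) (w r : List Char) (hw : c ∉ w) :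
    pvSplit [c] (w ++ c :: r) = w :: pvSplit [c] r := by
  induction w with
  | nil =>
    simp only [List.nil_append]
    rw [pvSplit]
    simp [List.isPrefixOf]
  | cons a w' ih =>
    have hac : ¬ (c == a) = true := by
      simp only [beq_iff_eq]
      intro h; exact hw (by simp [h.symm])
    have hw' : c ∉ w' := fun h => hw (List.mem_cons_of_mem _ h)
    rw [List.cons_append, pvSplit]
    simp only [List.isPrefixOf, hac, Bool.false_and, Bool.and_eq_true, false_and, ne_eq,
      and_false, if_neg, not_false_iff, Bool.false_eq_true]
    rw [ih hw']
    simp [List.modifyHead]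

theorem join_pvSplit (c : Char) (l : List Char) :
    PySem.Chars.join [c] (pvSplit [c] l) = l := by
  simp only [PySem.Chars.join]
  fun_induction pvSplit [c] l with
  | case1 => simp [List.intercalate]
  | case2 c0 t h ih =>
    have hc0 : c0 = c := by
      rcases h with ⟨h1, -⟩
      simp [List.isPrefixOf] at h1
      exact h1.symm
    simp only [List.length_cons, List.length_nil, Nat.zero_add, List.drop_one, List.tail_cons] at ih ⊢
    rw [intercalate_cons_ne _ _ _ (pvSplit_ne_nil _ _), ih, hc0]
    simp
  | case3 c0 t h ih =>
    cases h1 : pvSplit [c] t with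
    | nil => exact absurd h1 (pvSplit_ne_nil _ _)
    | cons x xs =>
      rw [h1] at ih
      cases xs with
      | nil =>
        simp only [List.modifyHead]
        rw [List.intercalate] at ih ⊢
        simp only [List.intersperse, List.flatten] at ih ⊢
        simp_all
      | cons y ys =>
        simp only [List.modifyHead]
        rw [intercalate_cons_ne _ _ _ (by simp)] at ih ⊢
        simp_all

theorem token0_iff (c : Char) (w l : List Char) (hw : c ∉ w) :
    (2 ≤ (pvSplit [c] l).length ∧ (pvSplit [c] l).getD 0 [] = w)
      ↔ PySem.Chars.startswith l (w ++ [c]) = true := by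
  rw [PySem.Chars.startswith_iff]
  constructor
  · rintro ⟨hlen, h0⟩
    rcases hS : pvSplit [c] l with _ | ⟨t0, rest⟩
    · exact absurd hS (pvSplit_ne_nil _ _)
    rcases rest with _ | ⟨t1, ts⟩
    · rw [hS] at hlen; simp at hlen
    rw [hS] at h0; simp at h0
    have hl := join_pvSplit c l
    rw [hS, h0] at hl
    simp only [PySem.Chars.join] at hl
    rw [intercalate_cons_ne _ _ _ (by simp)] at hl
    exact ⟨List.intercalate [c] (t1 :: ts), by rw [← hl]⟩
  · rintro ⟨r, hr⟩
    have hle : l = w ++ c :: r := by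
      rw [← hr]; simp
    rw [hle, pvSplit_append_cons c w r hw]
    refine ⟨?_, by simp⟩
    rcases h2 : pvSplit [c] r with _ | ⟨x, xs⟩
    · exact absurd h2 (pvSplit_ne_nil _ _)
    · simp

theorem token01_iff (c : Char) (u w l : List Char) (hu : c ∉ u) (hw : c ∉ w) :
    (3 ≤ (pvSplit [c] l).length ∧ (pvSplit [c] l).getD 0 [] = u ∧ (pvSplit [c] l).getD 1 [] = w)
      ↔ PySem.Chars.startswith l (u ++ c :: (w ++ [c])) = true := by
  rw [PySem.Chars.startswith_iff]
  constructor
  · rintro ⟨hlen, h0, h1⟩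
    rcases hS : pvSplit [c] l with _ | ⟨t0, rest⟩
    · exact absurd hS (pvSplit_ne_nil _ _)
    rcases rest with _ | ⟨t1, rest2⟩
    · rw [hS] at hlen; simp at hlen
    rcases rest2 with _ | ⟨t2, ts⟩
    · rw [hS] at hlen; simp at hlen
    rw [hS] at h0 h1; simp at h0 h1
    have hl := join_pvSplit c l
    rw [hS, h0, h1] at hl
    simp only [PySem.Chars.join] at hl
    rw [intercalate_cons_ne _ _ _ (by simp), intercalate_cons_ne _ _ _ (by simp)] at hl
    refine ⟨List.intercalate [c] (t2 :: ts), ?_⟩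
    rw [← hl]; simp
  · rintro ⟨r, hr⟩
    have hle : l = u ++ c :: (w ++ c :: r) := by
      rw [← hr]; simp
    rw [hle, pvSplit_append_cons c u _ hu, pvSplit_append_cons c w r hw]
    refine ⟨?_, by simp, by simp⟩
    rcases h2 : pvSplit [c] r with _ | ⟨x, xs⟩
    · exact absurd h2 (pvSplit_ne_nil _ _)
    · simp

theorem getD_map_ofList (L : List (List Char)) (i : Nat) :
    (L.map String.ofList).getD i "" = String.ofList (L.getD i []) := by
  simp [List.getD_eq_getElem?_getD, List.getElem?_map]

theorem ofList_eq_iff (t : List Char) (w : String) : String.ofList t = w ↔ t = w.toList := by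
  constructor
  · intro h; rw [← h]; simp
  · intro h; rw [h]; simp

theorem tokens_eq (s : String) :
    (PySem.Str.split? s ":").getD [] = (pvSplit [':'] s.toList).map String.ofList := by
  rw [PySem.Str.split?, PySem.Chars.split?]
  have h : (":" : String).toList = [':'] := rfl
  rw [h, splitOn_eq _ _ (by simp)]
  rfl

theorem schemes_mem (x : String) :
    ((pvSchemes.get? x).isSome = true) ↔ (x = "doi" ∨ x = "hdl" ∨ x = "issn" ∨ x = "ark" ∨ x = "ocn") := by
  constructor
  · intro h
    by_contra hc
    push_neg at hc
    obtain ⟨n1, n2, n3, n4, n5⟩ := hc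
    have b1 : ("doi" == x) = false := beq_eq_false_iff_ne.mpr (fun he => n1 he.symm)
    have b2 : ("hdl" == x) = false := beq_eq_false_iff_ne.mpr (fun he => n2 he.symm)
    have b3 : ("issn" == x) = false := beq_eq_false_iff_ne.mpr (fun he => n3 he.symm)
    have b4 : ("ark" == x) = false := beq_eq_false_iff_ne.mpr (fun he => n4 he.symm)
    have b5 : ("ocn" == x) = false := beq_eq_false_iff_ne.mpr (fun he => n5 he.symm)
    simp [pvSchemes, PySem.Dict.get?, List.find?, b1, b2, b3, b4, b5] at h
  · rintro (rfl | rfl | rfl | rfl | rfl) <;> decide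

theorem cond0_str (s w p : String) (hw : (':' : Char) ∉ w.toList) (hp : p.toList = w.toList ++ [':']) :
    (2 ≤ (pvSplit [':'] s.toList).length ∧ (pvSplit [':'] s.toList).getD 0 [] = w.toList)
      ↔ PySem.Str.startswith s p = true := by
  rw [PySem.Str.startswith, hp]
  exact token0_iff ':' w.toList s.toList hw

theorem cond01_str (s u w p : String) (hu : (':' : Char) ∉ u.toList) (hw : (':' : Char) ∉ w.toList)
    (hp : p.toList = u.toList ++ ':' :: (w.toList ++ [':'])) :
    (3 ≤ (pvSplit [':'] s.toList).length ∧ (pvSplit [':'] s.toList).getD 0 [] = u.toList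
      ∧ (pvSplit [':'] s.toList).getD 1 [] = w.toList)
      ↔ PySem.Str.startswith s p = true := by
  rw [PySem.Str.startswith, hp]
  exact token01_iff ':' u.toList w.toList s.toList hu hw

theorem scheme_branch_eq (s sch lab url u1 u2 : String) (h : pvSchemes.getD sch ("", "") = (lab, url))
    (e1 : ("urn:" ++ sch ++ ":" : String) = u1) (e2 : (sch ++ ":" : String) = u2)
    (h1 : u1 ≠ "") (h2 : u2 ≠ "") :
    ([("value", some s), ("type", some (pvSchemes.getD sch ("", "")).1),
      ("url", some ((pvSchemes.getD sch ("", "")).2 ++ pvWithout (pvWithout s ("urn:" ++ sch ++ ":")) (sch ++ ":")))]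
      : List (String × Option String))
    = [("value", some s), ("type", some lab),
       ("url", some (url ++ PySem.Str.replace (PySem.Str.replace s u1 "") u2 ""))] := by
  rw [h, e1, e2, pvWithout_eq_replace _ _ h2, pvWithout_eq_replace _ _ h1]

-- ===== VERDICT (by name: the statement is the Claim_ definition above) =====
theorem parse_alt_identifier_spec : Claim_equal_parse_alt_identifier := by
  intro alt _
  unfold Spec_parse_alt_identifier parse_alt_identifier parse_alt_identifier_alt
  simp only [tokens_eq, getD_map_ofList, ofList_eq_iff, List.length_map, schemes_mem,
    Bool.or_eq_true]
  set s := PySem.Str.strip (PySem.Str.lower alt) with hsdef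
  have hisbn := cond01_str s "urn" "isbn" "urn:isbn:" (by decide) (by decide) (by rfl)
  have hdoiB := cond0_str s "doi" "doi:" (by decide) (by rfl)
  have hdoiU := cond01_str s "urn" "doi" "urn:doi:" (by decide) (by decide) (by rfl)
  have hhdlB := cond0_str s "hdl" "hdl:" (by decide) (by rfl)
  have hhdlU := cond01_str s "urn" "hdl" "urn:hdl:" (by decide) (by decide) (by rfl)
  have hissnB := cond0_str s "issn" "issn:" (by decide) (by rfl)
  have hissnU := cond01_str s "urn" "issn" "urn:issn:" (by decide) (by decide) (by rfl)
  have harkB := cond0_str s "ark" "ark:" (by decide) (by rfl)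
  have harkU := cond01_str s "urn" "ark" "urn:ark:" (by decide) (by decide) (by rfl)
  have hocnB := cond0_str s "ocn" "ocn:" (by decide) (by rfl)
  have hocnU := cond01_str s "urn" "ocn" "urn:ocn:" (by decide) (by decide) (by rfl)
  by_cases hI : PySem.Str.startswith s "urn:isbn:" = true
  · rw [if_pos hI, if_pos (hisbn.mpr hI), pvWithout_eq_replace s "urn:isbn:" (by decide)]
  · rw [if_neg hI, if_neg (fun h => hI (hisbn.mp h))]
    by_cases hd : PySem.Str.startswith s "doi:" = true
    · obtain ⟨hL2, hg0⟩ := hdoiB.mpr hd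
      rw [if_pos (Or.inl hd), if_pos ⟨hL2, Or.inl hg0⟩]
      simp only [hg0, String.ofList_toList]
      rw [scheme_branch_eq s "doi" "DOI" "https://doi.org/" "urn:doi:" "doi:" (by decide) rfl rfl (by decide) (by decide)]
    · by_cases hud : PySem.Str.startswith s "urn:doi:" = true
      · obtain ⟨hL3, hg0, hg1⟩ := hdoiU.mpr hud
        rw [if_pos (Or.inr hud),
          if_neg (by rintro ⟨-, h | h | h | h | h⟩ <;> rw [hg0] at h <;> exact absurd h (by decide)),
          if_pos ⟨hL3, hg0, Or.inl hg1⟩]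
        simp only [hg1, String.ofList_toList]
        rw [scheme_branch_eq s "doi" "DOI" "https://doi.org/" "urn:doi:" "doi:" (by decide) rfl rfl (by decide) (by decide)]
      · rw [if_neg (fun h => h.elim hd hud)]
        by_cases hh : PySem.Str.startswith s "hdl:" = true
        · obtain ⟨hL2, hg0⟩ := hhdlB.mpr hh
          rw [if_pos (Or.inl hh), if_pos ⟨hL2, Or.inr (Or.inl hg0)⟩]
          simp only [hg0, String.ofList_toList]
          rw [scheme_branch_eq s "hdl" "Handle" "https://hdl.handle.net/" "urn:hdl:" "hdl:" (by decide) rfl rfl (by decide) (by decide)]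
        · by_cases huh : PySem.Str.startswith s "urn:hdl:" = true
          · obtain ⟨hL3, hg0, hg1⟩ := hhdlU.mpr huh
            rw [if_pos (Or.inr huh),
              if_neg (by rintro ⟨-, h | h | h | h | h⟩ <;> rw [hg0] at h <;> exact absurd h (by decide)),
              if_pos ⟨hL3, hg0, Or.inr (Or.inl hg1)⟩]
            simp only [hg1, String.ofList_toList]
            rw [scheme_branch_eq s "hdl" "Handle" "https://hdl.handle.net/" "urn:hdl:" "hdl:" (by decide) rfl rfl (by decide) (by decide)]
          · rw [if_neg (fun h => h.elim hh huh)]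
            by_cases hi : PySem.Str.startswith s "issn:" = true
            · obtain ⟨hL2, hg0⟩ := hissnB.mpr hi
              rw [if_pos (Or.inl hi), if_pos ⟨hL2, Or.inr (Or.inr (Or.inl hg0))⟩]
              simp only [hg0, String.ofList_toList]
              rw [scheme_branch_eq s "issn" "ISSN" "https://portal.issn.org/resource/ISSN/" "urn:issn:" "issn:" (by decide) rfl rfl (by decide) (by decide)]
            · by_cases hui : PySem.Str.startswith s "urn:issn:" = true
              · obtain ⟨hL3, hg0, hg1⟩ := hissnU.mpr hui
                rw [if_pos (Or.inr hui),
                  if_neg (by rintro ⟨-, h | h | h | h | h⟩ <;> rw [hg0] at h <;> exact absurd h (by decide)),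
                  if_pos ⟨hL3, hg0, Or.inr (Or.inr (Or.inl hg1))⟩]
                simp only [hg1, String.ofList_toList]
                rw [scheme_branch_eq s "issn" "ISSN" "https://portal.issn.org/resource/ISSN/" "urn:issn:" "issn:" (by decide) rfl rfl (by decide) (by decide)]
              · rw [if_neg (fun h => h.elim hi hui)]
                by_cases ha : PySem.Str.startswith s "ark:" = true
                · obtain ⟨hL2, hg0⟩ := harkB.mpr ha
                  rw [if_pos (Or.inl ha), if_pos ⟨hL2, Or.inr (Or.inr (Or.inr (Or.inl hg0)))⟩]
                  simp only [hg0, String.ofList_toList]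
                  rw [scheme_branch_eq s "ark" "ARK" "https://n2t.net/ark:/" "urn:ark:" "ark:" (by decide) rfl rfl (by decide) (by decide)]
                · by_cases hua : PySem.Str.startswith s "urn:ark:" = true
                  · obtain ⟨hL3, hg0, hg1⟩ := harkU.mpr hua
                    rw [if_pos (Or.inr hua),
                      if_neg (by rintro ⟨-, h | h | h | h | h⟩ <;> rw [hg0] at h <;> exact absurd h (by decide)),
                      if_pos ⟨hL3, hg0, Or.inr (Or.inr (Or.inr (Or.inl hg1)))⟩]
                    simp only [hg1, String.ofList_toList]
                    rw [scheme_branch_eq s "ark" "ARK" "https://n2t.net/ark:/" "urn:ark:" "ark:" (by decide) rfl rfl (by decide) (by decide)]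
                  · rw [if_neg (fun h => h.elim ha hua)]
                    by_cases ho : PySem.Str.startswith s "ocn:" = true
                    · obtain ⟨hL2, hg0⟩ := hocnB.mpr ho
                      rw [if_pos (Or.inl ho), if_pos ⟨hL2, Or.inr (Or.inr (Or.inr (Or.inr hg0)))⟩]
                      simp only [hg0, String.ofList_toList]
                      rw [scheme_branch_eq s "ocn" "OCLC" "https://www.worldcat.org/oclc/" "urn:ocn:" "ocn:" (by decide) rfl rfl (by decide) (by decide)]
                    · by_cases huo : PySem.Str.startswith s "urn:ocn:" = true
                      · obtain ⟨hL3, hg0, hg1⟩ := hocnU.mpr huo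
                        rw [if_pos (Or.inr huo),
                          if_neg (by rintro ⟨-, h | h | h | h | h⟩ <;> rw [hg0] at h <;> exact absurd h (by decide)),
                          if_pos ⟨hL3, hg0, Or.inr (Or.inr (Or.inr (Or.inr hg1)))⟩]
                        simp only [hg1, String.ofList_toList]
                        rw [scheme_branch_eq s "ocn" "OCLC" "https://www.worldcat.org/oclc/" "urn:ocn:" "ocn:" (by decide) rfl rfl (by decide) (by decide)]
                      · rw [if_neg (fun h => h.elim ho huo)]
                        have nc2 : ¬(2 ≤ (pvSplit [':'] s.toList).length ∧
                            ((pvSplit [':'] s.toList).getD 0 [] = "doi".toList ∨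
                              (pvSplit [':'] s.toList).getD 0 [] = "hdl".toList ∨
                                (pvSplit [':'] s.toList).getD 0 [] = "issn".toList ∨
                                  (pvSplit [':'] s.toList).getD 0 [] = "ark".toList ∨
                                    (pvSplit [':'] s.toList).getD 0 [] = "ocn".toList)) := by
                          rintro ⟨hL, h | h | h | h | h⟩
                          exacts [hd (hdoiB.mp ⟨hL, h⟩), hh (hhdlB.mp ⟨hL, h⟩), hi (hissnB.mp ⟨hL, h⟩),
                            ha (harkB.mp ⟨hL, h⟩), ho (hocnB.mp ⟨hL, h⟩)]
                        have nc3 : ¬(3 ≤ (pvSplit [':'] s.toList).length ∧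
                            (pvSplit [':'] s.toList).getD 0 [] = "urn".toList ∧
                            ((pvSplit [':'] s.toList).getD 1 [] = "doi".toList ∨
                              (pvSplit [':'] s.toList).getD 1 [] = "hdl".toList ∨
                                (pvSplit [':'] s.toList).getD 1 [] = "issn".toList ∨
                                  (pvSplit [':'] s.toList).getD 1 [] = "ark".toList ∨
                                    (pvSplit [':'] s.toList).getD 1 [] = "ocn".toList)) := by
                          rintro ⟨hL, h0, h | h | h | h | h⟩
                          exacts [hud (hdoiU.mp ⟨hL, h0, h⟩), huh (hhdlU.mp ⟨hL, h0, h⟩),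
                            hui (hissnU.mp ⟨hL, h0, h⟩), hua (harkU.mp ⟨hL, h0, h⟩), huo (hocnU.mp ⟨hL, h0, h⟩)]
                        rw [if_neg nc2, if_neg nc3]
                        by_cases hpq : PySem.Str.startswith s "urn:proquest.com/document-id/" = true
                        · rw [if_pos hpq, if_pos hpq,
                            pvWithout_eq_replace s "urn:proquest.com/document-id/" (by decide)]
                        · rw [if_neg hpq, if_neg hpq]
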